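-- pv_equiv track=rewrite | github.com/je-suis-tm/search-and-sort | bitonic sort.py | get_direction
-- ===== SOURCE A (Python) =====
-- def get_direction(iteration_number,length):
--
--     temp=iteration_number
--
--     direction=[0]*length
--
--     ind=[i for i in range(0,length,temp)]
--
--     for i in ind[0::2]:
--         direction[i]=1
--     for i in ind[1::2]:
--         direction[i]=-1
--
--     for i in range(len(direction)):
--         if direction[i]==0:
--             direction[i]=direction[i-1]
--
--     return direction
-- ===== SOURCE B (Python) =====
-- def get_direction(iteration_number, length):
--     direction = [0] * length
--     sign = 1
--     for start in range(0, length, iteration_number):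
--         for k in range(start, min(start + iteration_number, length)):
--             direction[k] = sign
--         sign = -sign
--     return direction
-- ===== Notes on version B (the rewrite author's own statement) =====
-- stated objective: simpler
-- what changed: Replaces A's three passes (sparse alternating marks at block starts plus a forward value-propagation sweep over the whole list) with a single direct traversal that fills each block with the current sign and flips it; the single pass also measures a constant-factor speedup.
import Mathlib
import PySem

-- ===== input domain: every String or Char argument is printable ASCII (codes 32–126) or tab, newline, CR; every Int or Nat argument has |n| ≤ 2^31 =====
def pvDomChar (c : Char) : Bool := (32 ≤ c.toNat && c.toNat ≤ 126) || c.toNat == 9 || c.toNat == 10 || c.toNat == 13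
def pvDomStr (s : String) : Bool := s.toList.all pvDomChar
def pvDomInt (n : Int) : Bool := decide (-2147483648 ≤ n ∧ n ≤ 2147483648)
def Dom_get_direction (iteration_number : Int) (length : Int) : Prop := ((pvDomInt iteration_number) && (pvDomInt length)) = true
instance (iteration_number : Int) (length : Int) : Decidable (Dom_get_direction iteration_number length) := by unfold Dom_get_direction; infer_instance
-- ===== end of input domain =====

-- B replaces A's three passes (alternating marks at block starts plus a forward propagation sweep)
-- with a single direct block-filling traversal over the same range; same return value on Pre_.


-- ===== PORT A =====
def get_direction (iteration_number : Int) (length : Int) : List Int :=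
  let temp := iteration_number
  let direction : List Int := List.replicate length.toNat 0
  let ind := PySem.List.pyRange 0 length temp
  let direction :=
    ((PySem.List.slice? ind (some 0) none 2).getD []).foldl
      (fun d i => PySem.List.pySetD d i 1) direction
  let direction :=
    ((PySem.List.slice? ind (some 1) none 2).getD []).foldl
      (fun d i => PySem.List.pySetD d i (-1)) direction
  let direction :=
    (PySem.List.pyRange 0 (direction.length : Int) 1).foldl
      (fun d i =>
        if PySem.List.pyGetD d i 0 = 0 then
          PySem.List.pySetD d i (PySem.List.pyGetD d (i - 1) 0)
        else d) direction
  direction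

-- ===== PORT B =====
def get_direction_alt (iteration_number : Int) (length : Int) : List Int :=
  let direction : List Int := List.replicate length.toNat 0
  let res := (PySem.List.pyRange 0 length iteration_number).foldl
    (fun (p : List Int × Int) start =>
      ((PySem.List.pyRange start (min (start + iteration_number) length) 1).foldl
        (fun d k => PySem.List.pySetD d k p.2) p.1, -p.2))
    (direction, 1)
  res.1

-- ===== PRECONDITION & SPEC =====
-- Pre_ excludes exactly the inputs on which the Python A raises:
-- iteration_number = 0 (range() step 0, ValueError) and iteration_number < 0 with length < 0 (IndexError).
def Pre_get_direction (iteration_number : Int) (length : Int) : Prop :=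
  iteration_number ≠ 0 ∧ (0 ≤ length ∨ 0 < iteration_number)
instance (iteration_number : Int) (length : Int) : Decidable (Pre_get_direction iteration_number length) := by unfold Pre_get_direction; infer_instance
def pvWitness_get_direction : Int × Int := (2, 7)

def Spec_get_direction (iteration_number : Int) (length : Int) (out : List Int) : Prop := out = get_direction_alt iteration_number length
instance (iteration_number : Int) (length : Int) (out : List Int) : Decidable (Spec_get_direction iteration_number length out) := by unfold Spec_get_direction; infer_instance

-- ===== CLAIM (what is proved, stated in full; the proofs are below) =====
def Claim_equal_get_direction : Prop := ∀ (iteration_number : Int) (length : Int), Dom_get_direction iteration_number length → Pre_get_direction iteration_number length → Spec_get_direction iteration_number length (get_direction iteration_number length)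

-- ===== LEMMAS AND PROOFS =====
-- sign of block j
def tgtF (temp k : Int) : Int := if (k / temp) % 2 = 0 then 1 else -1
-- value after A's marking loops
def eF (temp length k : Int) : Int := if k % temp = 0 ∧ k < length then tgtF temp k else 0

theorem setfold_getElem? (v : Int) : ∀ (l : List Int) (d : List Int),
    (∀ i ∈ l, 0 ≤ i ∧ i < (d.length : Int)) →
    ∀ k : Nat, (l.foldl (fun d i => PySem.List.pySetD d i v) d)[k]? =
      if (k : Int) ∈ l then some v else d[k]? := by
  intro l
  induction l with
  | nil => intro d _ k; simp
  | cons i l ih =>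
    intro d h k
    have hi := h i (List.mem_cons_self ..)
    have hset : PySem.List.pySetD d i v = d.set i.toNat v :=
      PySem.List.pySetD_of_nonneg d v hi.1
    simp only [List.foldl_cons]
    rw [ih _ (by intro j hj; have := h j (List.mem_cons_of_mem _ hj); simpa [PySem.List.length_pySetD] using this)]
    by_cases hk : (k : Int) ∈ l
    · simp [hk]
    · simp only [hk, if_false, List.mem_cons, or_false]
      rw [hset, List.getElem?_set]
      by_cases he : (k : Int) = i
      · have h1 : i.toNat = k := by omega
        simp [h1, he, show k < d.length by omega]
      · have h1 : i.toNat ≠ k := by omega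
        simp [h1, he]

theorem setfold_length (v : Int) (l : List Int) (d : List Int) :
    (l.foldl (fun d i => PySem.List.pySetD d i v) d).length = d.length := by
  induction l generalizing d with
  | nil => rfl
  | cons i l ih => simp [List.foldl_cons, ih, PySem.List.length_pySetD]

theorem pyRange_pos_nil (a b s : Int) (hs : 0 < s) (hb : b ≤ a) :
    PySem.List.pyRange a b s = [] := by
  rw [PySem.List.pyRange_of_pos _ _ hs]
  simp [show ¬ a < b by omega]

theorem pyRange_neg_nil (b s : Int) (hs : s < 0) (hb : 0 ≤ b) :
    PySem.List.pyRange 0 b s = [] := by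
  unfold PySem.List.pyRange
  simp [show s ≠ 0 by omega, show ¬ (0:Int) < s by omega, show ¬ b < 0 by omega]

theorem pyRange_pos_cons (a b s : Int) (hs : 0 < s) (hab : a < b) :
    PySem.List.pyRange a b s = a :: PySem.List.pyRange (a + s) b s := by
  rw [PySem.List.pyRange_of_pos _ _ hs, PySem.List.pyRange_of_pos _ _ hs]
  have hq0 : 0 ≤ (b - a - 1) / s := Int.ediv_nonneg (by omega) (by omega)
  have key : ((b - a + s - 1) / s).toNat
      = (if a + s < b then ((b - (a + s) + s - 1) / s).toNat else 0) + 1 := by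
    by_cases h : a + s < b
    · rw [if_pos h]
      have e1 : b - a + s - 1 = (b - (a + s) + s - 1) + s * 1 := by ring
      rw [e1, Int.add_mul_ediv_left _ _ (by omega : s ≠ 0)]
      have : 0 ≤ (b - (a + s) + s - 1) / s := Int.ediv_nonneg (by omega) (by omega)
      omega
    · rw [if_neg h]
      have h1 : (1:Int) ≤ (b - a + s - 1) / s := by
        rw [Int.le_ediv_iff_mul_le hs]; omega
      have h2 : (b - a + s - 1) / s < 2 := by
        rw [Int.ediv_lt_iff_lt_mul hs]; omega
      omega
  rw [if_pos hab, key, List.range_succ_eq_map]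
  simp only [List.map_cons, List.map_map]
  congr 1
  · simp
  · apply List.map_congr_left
    intro k _
    simp [Function.comp]
    ring

theorem mem_slice0 (xs : List Int) (x : Int) :
    x ∈ (PySem.List.slice? xs (some 0) none 2).getD [] ↔ ∃ m : Nat, xs[2*m]? = some x := by
  simp only [PySem.List.slice?, PySem.List.sliceIndices]
  norm_num
  constructor
  · rintro ⟨a, ha, h⟩
    exact ⟨a, by rwa [show ((2:Int)*(a:Nat)).toNat = 2*a by omega] at h⟩
  · rintro ⟨m, h⟩
    have hlt : 2*m < xs.length := (List.getElem?_eq_some_iff.1 h).1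
    refine ⟨m, ?_, by rwa [show ((2:Int)*(m:Nat)).toNat = 2*m by omega]⟩
    rw [if_pos (by omega : 0 < xs.length)]
    omega

theorem mem_slice1 (xs : List Int) (x : Int) :
    x ∈ (PySem.List.slice? xs (some 1) none 2).getD [] ↔ ∃ m : Nat, xs[2*m+1]? = some x := by
  simp only [PySem.List.slice?, PySem.List.sliceIndices]
  norm_num
  by_cases h0 : xs.length = 0
  · constructor
    · rintro ⟨a, ha, h⟩
      rw [h0] at ha
      simp at ha
    · rintro ⟨m, h⟩
      have hlt : 2*m+1 < xs.length := (List.getElem?_eq_some_iff.1 h).1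
      omega
  · have h1 : min 1 (xs.length : Int) = 1 := by omega
    rw [h1]
    constructor
    · rintro ⟨a, ha, h⟩
      exact ⟨a, by rwa [show ((1:Int) + 2*(a:Nat)).toNat = 2*a+1 by omega] at h⟩
    · rintro ⟨m, h⟩
      have hlt : 2*m+1 < xs.length := (List.getElem?_eq_some_iff.1 h).1
      refine ⟨m, ?_, by rwa [show ((1:Int) + 2*(m:Nat)).toNat = 2*m+1 by omega]⟩
      rw [if_pos (by omega : 1 < xs.length)]
      omega

theorem ind_getElem? (temp length : Int) (ht : 0 < temp) (j : Nat) (x : Int) :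
    (PySem.List.pyRange 0 length temp)[j]? = some x ↔
      x = temp * j ∧ x ∈ PySem.List.pyRange 0 length temp := by
  rw [PySem.List.pyRange_of_pos _ _ ht]
  constructor
  · intro h
    rcases List.getElem?_eq_some_iff.1 h with ⟨hlt, he⟩
    simp only [List.length_map, List.length_range] at hlt
    simp only [List.getElem_map, List.getElem_range] at he
    refine ⟨by linarith, List.mem_map.2 ⟨j, List.mem_range.2 hlt, he⟩⟩
  · rintro ⟨hx, hmem⟩
    rcases List.mem_map.1 hmem with ⟨a, ha, hfa⟩
    have haj : a = j := by
      have h2 : temp * (a:Int) = temp * (j:Int) := by linarith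
      have := mul_left_cancel₀ (show temp ≠ 0 by omega) h2
      exact_mod_cast this
    subst haj
    have hM := List.mem_range.1 ha
    simp only [List.getElem?_map, List.getElem?_range, hM, if_true, Option.map_some,
      Option.some_inj]
    linarith

theorem ediv_block (temp a k : Int) (ht : 0 < temp) (hd : temp ∣ a)
    (h1 : a ≤ k) (h2 : k < a + temp) : k / temp = a / temp := by
  obtain ⟨q, rfl⟩ := hd
  have e : k = (k - temp * q) + temp * q := by ring
  rw [e, Int.add_mul_ediv_left _ _ (ne_of_gt ht),
      Int.ediv_eq_zero_of_lt (by omega) (by omega),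
      Int.mul_ediv_cancel_left _ (ne_of_gt ht)]
  omega

theorem tgt_block (temp a k : Int) (ht : 0 < temp) (hd : temp ∣ a)
    (h1 : a ≤ k) (h2 : k < a + temp) : tgtF temp k = tgtF temp a := by
  unfold tgtF
  rw [ediv_block temp a k ht hd h1 h2]

theorem tgt_succ (temp a : Int) (ht : 0 < temp) : tgtF temp (a + temp) = - tgtF temp a := by
  unfold tgtF
  have e : (a + temp) / temp = a / temp + 1 := by
    rw [show a + temp = a + temp * 1 by ring, Int.add_mul_ediv_left _ _ (ne_of_gt ht)]
  rw [e]
  by_cases h : (a / temp) % 2 = 0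
  · simp [h, show ¬ (a / temp + 1) % 2 = 0 by omega]
  · simp [h, show (a / temp + 1) % 2 = 0 by omega]

theorem ediv_pred (temp m : Int) (ht : 0 < temp) (h0 : 0 ≤ m) (hm : m % temp ≠ 0) :
    (m - 1) / temp = m / temp := by
  have h1 := Int.emod_def m temp
  have h2 : 0 ≤ m % temp := Int.emod_nonneg m (ne_of_gt ht)
  have h3 : m % temp < temp := Int.emod_lt_of_pos m ht
  have e : m - 1 = (m % temp - 1) + temp * (m / temp) := by omega
  rw [e, Int.add_mul_ediv_left _ _ (ne_of_gt ht),
      Int.ediv_eq_zero_of_lt (by omega) (by omega)]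
  omega

theorem pyGetD_replicate_zero (n : Nat) (j : Int) :
    PySem.List.pyGetD (List.replicate n (0:Int)) j 0 = 0 := by
  unfold PySem.List.pyGetD
  cases h : PySem.List.pyGet? (List.replicate n (0:Int)) j with
  | none => rfl
  | some x =>
    have := PySem.List.mem_of_pyGet?_eq_some _ h
    simp [List.eq_of_mem_replicate this]

theorem zerofold (n : Nat) : ∀ l : List Int, (∀ i ∈ l, 0 ≤ i) →
    l.foldl (fun d i => if PySem.List.pyGetD d i 0 = 0 then
        PySem.List.pySetD d i (PySem.List.pyGetD d (i-1) 0) else d)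
      (List.replicate n (0:Int)) = List.replicate n (0:Int) := by
  intro l
  induction l with
  | nil => intro _; rfl
  | cons i l ih =>
    intro h
    have hi := h i (List.mem_cons_self ..)
    simp only [List.foldl_cons, pyGetD_replicate_zero, reduceIte,
      PySem.List.pySetD_of_nonneg _ _ hi, List.set_replicate_self]
    exact ih (fun j hj => h j (List.mem_cons_of_mem _ hj))

theorem prop_fold (temp length : Int) (ht : 0 < temp) (d : List Int)
    (hlen : d.length = length.toNat)
    (hd : ∀ k : Nat, k < length.toNat → d[k]? = some (eF temp length (k:Int))) :
    ∀ m : Nat, m ≤ length.toNat →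
      ((PySem.List.pyRange 0 (m:Int) 1).foldl
          (fun d i => if PySem.List.pyGetD d i 0 = 0 then
            PySem.List.pySetD d i (PySem.List.pyGetD d (i-1) 0) else d) d).length = length.toNat ∧
      ∀ k : Nat, k < length.toNat →
        ((PySem.List.pyRange 0 (m:Int) 1).foldl
          (fun d i => if PySem.List.pyGetD d i 0 = 0 then
            PySem.List.pySetD d i (PySem.List.pyGetD d (i-1) 0) else d) d)[k]? =
          some (if k < m then tgtF temp (k:Int) else eF temp length (k:Int)) := by
  intro m
  induction m with
  | zero =>
    intro _
    simp only [Nat.cast_zero]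
    rw [PySem.List.pyRange_one_eq_nil (le_refl 0)]
    simp only [List.foldl_nil]
    refine ⟨hlen, fun k hk => ?_⟩
    rw [hd k hk, if_neg (Nat.not_lt_zero k)]
  | succ m ih =>
    intro hm1
    obtain ⟨ihlen, ihk⟩ := ih (by omega)
    have hcast : ((m+1:Nat):Int) = (m:Int) + 1 := by push_cast; ring
    rw [hcast, PySem.List.pyRange_one_succ_right (by omega : (0:Int) ≤ (m:Int)),
        List.foldl_append, List.foldl_cons, List.foldl_nil]
    set r := ((PySem.List.pyRange 0 (m:Int) 1).foldl
        (fun d i => if PySem.List.pyGetD d i 0 = 0 then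
          PySem.List.pySetD d i (PySem.List.pyGetD d (i-1) 0) else d) d) with hr
    have hmn : m < length.toNat := by omega
    have hrm : r[m]? = some (eF temp length (m:Int)) := by
      rw [ihk m hmn, if_neg (lt_irrefl m)]
    have hg : PySem.List.pyGetD r (m:Int) 0 = eF temp length (m:Int) := by
      rw [PySem.List.pyGetD_of_nonneg _ _ (Int.natCast_nonneg m), Int.toNat_natCast,
          List.getD_eq_getElem?_getD, hrm]
      rfl
    by_cases hz : eF temp length (m:Int) = 0
    · have hm0 : m ≠ 0 := by
        rintro rfl
        have hl0 : (0:Int) < length := by omega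
        unfold eF tgtF at hz
        simp only [Nat.cast_zero, Int.zero_emod, Int.zero_ediv, hl0, and_true] at hz
        norm_num at hz
      have hmod : (m:Int) % temp ≠ 0 := by
        unfold eF at hz
        intro hmm
        rw [if_pos ⟨hmm, by omega⟩] at hz
        unfold tgtF at hz
        split_ifs at hz <;> omega
      have hprev : PySem.List.pyGetD r ((m:Int)-1) 0 = tgtF temp ((m:Int)-1) := by
        rw [PySem.List.pyGetD_of_nonneg _ _ (by omega : (0:Int) ≤ (m:Int)-1)]
        have h1 : ((m:Int)-1).toNat = m-1 := by omega
        rw [h1, List.getD_eq_getElem?_getD, ihk (m-1) (by omega), if_pos (by omega)]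
        have h2 : ((m-1:Nat):Int) = (m:Int)-1 := by omega
        rw [h2]
        rfl
      have htg : tgtF temp ((m:Int)-1) = tgtF temp (m:Int) := by
        unfold tgtF
        rw [ediv_pred temp (m:Int) ht (Int.natCast_nonneg m) hmod]
      rw [hg, if_pos hz, hprev,
          PySem.List.pySetD_of_nonneg _ _ (Int.natCast_nonneg m), Int.toNat_natCast]
      constructor
      · rw [List.length_set]; exact ihlen
      · intro k hk
        rw [List.getElem?_set]
        by_cases hkm : m = k
        · subst hkm
          simp only [if_pos rfl, ihlen, hmn, if_true, htg]
          rw [if_pos (by omega : m < m + 1)]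
        · rw [if_neg hkm, ihk k hk]
          congr 1
          by_cases hkm2 : k < m
          · rw [if_pos hkm2, if_pos (by omega)]
          · rw [if_neg hkm2, if_neg (by omega)]
    · rw [hg, if_neg hz]
      refine ⟨ihlen, fun k hk => ?_⟩
      rw [ihk k hk]
      congr 1
      by_cases hkm : k < m
      · rw [if_pos hkm, if_pos (by omega)]
      · by_cases hkm2 : k = m
        · subst hkm2
          rw [if_neg hkm, if_pos (by omega)]
          unfold eF at hz ⊢
          by_cases h : ((k:Int) % temp = 0 ∧ (k:Int) < length)
          · rw [if_pos h]
          · rw [if_neg h] at hz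
            exact absurd rfl hz
        · rw [if_neg hkm, if_neg (by omega)]

theorem B_fold (temp length : Int) (ht : 0 < temp) :
    ∀ (fuel : Nat) (a s : Int) (d : List Int),
      (length - a).toNat ≤ fuel → 0 ≤ a → temp ∣ a → s = tgtF temp a →
      d.length = length.toNat →
      (∀ k : Nat, k < length.toNat → d[k]? = some (if (k:Int) < a then tgtF temp (k:Int) else 0)) →
      ((PySem.List.pyRange a length temp).foldl
          (fun (p : List Int × Int) start =>
            ((PySem.List.pyRange start (min (start + temp) length) 1).foldl
              (fun d k => PySem.List.pySetD d k p.2) p.1, -p.2)) (d, s)).1.length = length.toNat ∧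
      ∀ k : Nat, k < length.toNat →
        ((PySem.List.pyRange a length temp).foldl
          (fun (p : List Int × Int) start =>
            ((PySem.List.pyRange start (min (start + temp) length) 1).foldl
              (fun d k => PySem.List.pySetD d k p.2) p.1, -p.2)) (d, s)).1[k]? =
          some (tgtF temp (k:Int)) := by
  intro fuel
  induction fuel with
  | zero =>
    intro a s d hf ha hdvd hs hlen hdk
    rw [pyRange_pos_nil a length temp ht (by omega)]
    simp only [List.foldl_nil]
    exact ⟨hlen, fun k hk => by rw [hdk k hk, if_pos (by omega)]⟩
  | succ f ih =>
    intro a s d hf ha hdvd hs hlen hdk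
    by_cases hab : a < length
    · rw [pyRange_pos_cons a length temp ht hab, List.foldl_cons]
      have hsub : ∀ i ∈ PySem.List.pyRange a (min (a+temp) length) 1, 0 ≤ i ∧ i < (d.length:Int) := by
        intro i hi
        have h := PySem.List.mem_pyRange_one.1 hi
        refine ⟨by omega, by rw [hlen]; omega⟩
      have hstepk := setfold_getElem? s (PySem.List.pyRange a (min (a+temp) length) 1) d hsub
      have hsteplen := setfold_length s (PySem.List.pyRange a (min (a+temp) length) 1) d
      exact ih (a+temp) (-s)
        ((PySem.List.pyRange a (min (a+temp) length) 1).foldl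
          (fun d k => PySem.List.pySetD d k s) d)
        (by omega) (by omega) (Dvd.dvd.add hdvd (dvd_refl temp))
        (by rw [tgt_succ temp a ht, hs])
        (by rw [hsteplen, hlen])
        (fun k hk => by
          rw [hstepk k]
          by_cases h1 : (k:Int) < a
          · rw [if_neg (fun hmem => by have := PySem.List.mem_pyRange_one.1 hmem; omega),
                hdk k hk, if_pos h1, if_pos (by omega)]
          · by_cases h2 : (k:Int) < a + temp
            · have hkl : (k:Int) < length := by omega
              rw [if_pos (PySem.List.mem_pyRange_one.2 ⟨by omega, by omega⟩), if_pos h2, hs,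
                  tgt_block temp a (k:Int) ht hdvd (by omega) h2]
            · rw [if_neg (fun hmem => by have := PySem.List.mem_pyRange_one.1 hmem; omega),
                  hdk k hk, if_neg h1, if_neg h2])
    · rw [pyRange_pos_nil a length temp ht (by omega)]
      simp only [List.foldl_nil]
      exact ⟨hlen, fun k hk => by rw [hdk k hk, if_pos (by omega)]⟩

theorem marks_char (temp length : Int) (ht : 0 < temp) :
    ∀ k : Nat,
    (((PySem.List.slice? (PySem.List.pyRange 0 length temp) (some 1) none 2).getD []).foldl
        (fun d i => PySem.List.pySetD d i (-1))
        (((PySem.List.slice? (PySem.List.pyRange 0 length temp) (some 0) none 2).getD []).foldl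
          (fun d i => PySem.List.pySetD d i 1)
          (List.replicate length.toNat (0:Int))))[k]?
      = if k < length.toNat then some (eF temp length (k:Int)) else none := by
  intro k
  set ind := PySem.List.pyRange 0 length temp with hind
  set d0 := List.replicate length.toNat (0:Int) with hd0
  set evens := (PySem.List.slice? ind (some 0) none 2).getD [] with hev
  set odds := (PySem.List.slice? ind (some 1) none 2).getD [] with hod
  set d1 := evens.foldl (fun d i => PySem.List.pySetD d i 1) d0 with hd1
  have hmem : ∀ x ∈ ind, 0 ≤ x ∧ x < length ∧ temp ∣ x := by
    intro x hx
    have h := (PySem.List.mem_pyRange_iff_of_pos ht x).1 hx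
    exact ⟨h.1, h.2.1, by simpa using h.2.2⟩
  have hev_sub : ∀ x ∈ evens, x ∈ ind := by
    intro x hx
    rcases (mem_slice0 ind x).1 hx with ⟨m, hm⟩
    exact List.mem_of_getElem? hm
  have hod_sub : ∀ x ∈ odds, x ∈ ind := by
    intro x hx
    rcases (mem_slice1 ind x).1 hx with ⟨m, hm⟩
    exact List.mem_of_getElem? hm
  have hlen0 : d0.length = length.toNat := by rw [hd0, List.length_replicate]
  have h1len : d1.length = length.toNat := by rw [hd1, setfold_length]; exact hlen0
  have h1k : ∀ k : Nat, d1[k]? = if (k:Int) ∈ evens then some 1 else d0[k]? := by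
    intro k
    rw [hd1]
    exact setfold_getElem? 1 evens d0
      (fun i hi => ⟨(hmem i (hev_sub i hi)).1, by
        rw [hlen0]; have := hmem i (hev_sub i hi); omega⟩) k
  have h2k : ∀ k : Nat,
      (odds.foldl (fun d i => PySem.List.pySetD d i (-1)) d1)[k]? =
        if (k:Int) ∈ odds then some (-1) else d1[k]? := by
    intro k
    exact setfold_getElem? (-1) odds d1
      (fun i hi => ⟨(hmem i (hod_sub i hi)).1, by
        rw [h1len]; have := hmem i (hod_sub i hi); omega⟩) k
  by_cases hk : k < length.toNat
  · rw [if_pos hk]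
    have hkl : (k:Int) < length := by omega
    have hodd : (k:Int) ∈ odds ↔ ((k:Int) % temp = 0 ∧ ((k:Int)/temp) % 2 = 1) := by
      rw [hod, mem_slice1]
      constructor
      · rintro ⟨m, hm⟩
        obtain ⟨he, _⟩ := (ind_getElem? temp length ht (2*m+1) (k:Int)).1 hm
        have he' : (k:Int) = temp * (2*(m:Int)+1) := by push_cast at he; linarith
        constructor
        · rw [he']; exact Int.mul_emod_right _ _
        · rw [he', Int.mul_ediv_cancel_left _ (ne_of_gt ht)]; omega
      · rintro ⟨hmod, hpar⟩
        have hdvd : temp ∣ (k:Int) := Int.dvd_of_emod_eq_zero hmod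
        have hj0 : 0 ≤ (k:Int)/temp := Int.ediv_nonneg (by omega) (by omega)
        refine ⟨(((k:Int)/temp - 1)/2).toNat, (ind_getElem? temp length ht _ _).2 ⟨?_, ?_⟩⟩
        · have hjj : (((((k:Int)/temp - 1)/2).toNat : Nat) : Int) = ((k:Int)/temp - 1)/2 := by omega
          push_cast
          rw [hjj]
          have : temp * ((k:Int)/temp) = (k:Int) := Int.mul_ediv_cancel' hdvd
          have hrec : (k:Int)/temp = 2*(((k:Int)/temp - 1)/2) + 1 := by omega
          linarith [hrec ▸ this]
        · exact (PySem.List.mem_pyRange_iff_of_pos ht _).2 ⟨by omega, hkl, by simpa using hdvd⟩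
    have heven : (k:Int) ∈ evens ↔ ((k:Int) % temp = 0 ∧ ((k:Int)/temp) % 2 = 0) := by
      rw [hev, mem_slice0]
      constructor
      · rintro ⟨m, hm⟩
        obtain ⟨he, _⟩ := (ind_getElem? temp length ht (2*m) (k:Int)).1 hm
        have he' : (k:Int) = temp * (2*(m:Int)) := by push_cast at he; linarith
        constructor
        · rw [he']; exact Int.mul_emod_right _ _
        · rw [he', Int.mul_ediv_cancel_left _ (ne_of_gt ht)]; omega
      · rintro ⟨hmod, hpar⟩
        have hdvd : temp ∣ (k:Int) := Int.dvd_of_emod_eq_zero hmod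
        have hj0 : 0 ≤ (k:Int)/temp := Int.ediv_nonneg (by omega) (by omega)
        refine ⟨((((k:Int)/temp))/2).toNat, (ind_getElem? temp length ht _ _).2 ⟨?_, ?_⟩⟩
        · have hjj : ((((((k:Int)/temp))/2).toNat : Nat) : Int) = (((k:Int)/temp))/2 := by omega
          push_cast
          rw [hjj]
          have : temp * ((k:Int)/temp) = (k:Int) := Int.mul_ediv_cancel' hdvd
          have hrec : (k:Int)/temp = 2*((((k:Int)/temp))/2) := by omega
          linarith [hrec ▸ this]
        · exact (PySem.List.mem_pyRange_iff_of_pos ht _).2 ⟨by omega, hkl, by simpa using hdvd⟩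
    rw [h2k k, h1k k]
    by_cases ho : (k:Int) ∈ odds
    · rw [if_pos ho]
      obtain ⟨hm, hp⟩ := hodd.1 ho
      unfold eF tgtF
      rw [if_pos ⟨hm, hkl⟩, if_neg (by omega)]
    · rw [if_neg ho]
      by_cases he : (k:Int) ∈ evens
      · rw [if_pos he]
        obtain ⟨hm, hp⟩ := heven.1 he
        unfold eF tgtF
        rw [if_pos ⟨hm, hkl⟩, if_pos hp]
      · rw [if_neg he, hd0, List.getElem?_replicate, if_pos hk]
        unfold eF
        have hguard : ¬ ((k:Int) % temp = 0 ∧ (k:Int) < length) := by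
          rintro ⟨hm, _⟩
          rcases Int.emod_two_eq ((k:Int)/temp) with hp | hp
          · exact he (heven.2 ⟨hm, hp⟩)
          · exact ho (hodd.2 ⟨hm, hp⟩)
        rw [if_neg hguard]
  · rw [if_neg hk, h2k k, h1k k]
    have hko : (k:Int) ∉ odds := fun hx => by have := hmem _ (hod_sub _ hx); omega
    have hke : (k:Int) ∉ evens := fun hx => by have := hmem _ (hev_sub _ hx); omega
    rw [if_neg hko, if_neg hke, hd0, List.getElem?_replicate, if_neg hk]

theorem ports_eq (temp length : Int) (ht : temp ≠ 0) (hl : 0 ≤ length ∨ 0 < temp) :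
    get_direction temp length = get_direction_alt temp length := by
  rcases lt_or_gt_of_ne ht with hneg | hpos
  · have hl0 : 0 ≤ length := by rcases hl with h | h <;> omega
    unfold get_direction get_direction_alt
    dsimp only
    rw [pyRange_neg_nil length temp hneg hl0]
    have s0 : (PySem.List.slice? ([]:List Int) (some 0) none 2).getD [] = [] := rfl
    have s1 : (PySem.List.slice? ([]:List Int) (some 1) none 2).getD [] = [] := rfl
    rw [s0, s1]
    simp only [List.foldl_nil, List.length_replicate]
    exact zerofold length.toNat _ (fun i hi => (PySem.List.mem_pyRange_one.1 hi).1)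
  · unfold get_direction get_direction_alt
    dsimp only
    have hmk := marks_char temp length hpos
    set d2 := (((PySem.List.slice? (PySem.List.pyRange 0 length temp) (some 1) none 2).getD []).foldl
        (fun d i => PySem.List.pySetD d i (-1))
        (((PySem.List.slice? (PySem.List.pyRange 0 length temp) (some 0) none 2).getD []).foldl
          (fun d i => PySem.List.pySetD d i 1)
          (List.replicate length.toNat (0:Int)))) with hd2
    have h2len : d2.length = length.toNat := by
      rw [hd2, setfold_length, setfold_length, List.length_replicate]
    rw [h2len]
    obtain ⟨hAlen, hAk⟩ := prop_fold temp length hpos d2 h2len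
      (fun k hk => by rw [hmk k, if_pos hk]) length.toNat (le_refl _)
    obtain ⟨hBlen, hBk⟩ := B_fold temp length hpos length.toNat 0 1
      (List.replicate length.toNat (0:Int))
      (by omega) (le_refl 0) (dvd_zero temp)
      (by unfold tgtF; rw [Int.zero_ediv]; norm_num)
      (List.length_replicate)
      (fun k hk => by
        rw [List.getElem?_replicate, if_pos hk, if_neg (by omega : ¬ (k:Int) < 0)])
    apply List.ext_getElem?
    intro k
    by_cases hk : k < length.toNat
    · rw [hAk k hk, hBk k hk, if_pos hk]
    · rw [List.getElem?_eq_none, List.getElem?_eq_none]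
      · rw [hBlen]; omega
      · rw [hAlen]; omega

-- ===== VERDICT (by name: the statement is the Claim_ definition above) =====
theorem get_direction_spec : Claim_equal_get_direction := by
  intro iteration_number length _ hpre
  unfold Spec_get_direction
  exact ports_eq iteration_number length hpre.1 hpre.2
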